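-- pv_equiv track=rewrite | github.com/fmlab-iis/cryptoline | examples/pqclean/kyber768/avx2/invntt.py | coeff_bounds
-- ===== SOURCE A (Python) =====
-- def coeff_bounds (bounds, slice_size):
--     idxs = []
--     for i in range (len (bounds)):
--         cur = [ bounds[i] for j in range (16)]
--         idxs.append (cur)
--     ret = []
--     for k in range (16//slice_size):
--         for i in range (len (bounds)):
--             ret = ret + idxs[i][(k*slice_size):((k+1)*slice_size)]
--     return (ret)
-- ===== SOURCE B (Python) =====
-- def coeff_bounds(bounds, slice_size):
--     nblocks = 16 // slice_size
--     return [b for _ in range(nblocks) for b in bounds for _ in range(slice_size)]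
-- ===== Notes on version B (the rewrite author's own statement) =====
-- stated objective: simpler
-- what changed: B drops A's intermediate list of 16-copy rows and its per-block slicing: it computes nblocks = 16//slice_size and emits each bound repeated slice_size times, nblocks block rounds, in one comprehension.
import Mathlib
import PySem

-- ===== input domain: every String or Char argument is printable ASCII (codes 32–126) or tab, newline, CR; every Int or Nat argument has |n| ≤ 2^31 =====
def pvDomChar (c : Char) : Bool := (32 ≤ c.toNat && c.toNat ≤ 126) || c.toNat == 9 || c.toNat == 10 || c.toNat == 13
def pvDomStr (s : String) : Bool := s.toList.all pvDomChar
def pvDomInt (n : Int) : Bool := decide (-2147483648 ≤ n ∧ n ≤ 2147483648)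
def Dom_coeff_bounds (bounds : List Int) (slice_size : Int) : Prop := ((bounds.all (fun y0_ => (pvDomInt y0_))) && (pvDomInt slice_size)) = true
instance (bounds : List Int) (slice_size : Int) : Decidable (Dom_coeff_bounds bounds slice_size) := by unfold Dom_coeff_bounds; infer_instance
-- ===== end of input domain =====

-- B replaces A's 16-copy rows + per-block slicing by one comprehension that repeats
-- each bound slice_size times, 16//slice_size block rounds (simpler decomposition).

-- ===== PORT A =====
def coeff_bounds (bounds : List Int) (slice_size : Int) : List Int :=
  let idxs : List (List Int) :=
    (PySem.List.pyRange 0 (bounds.length : Int) 1).foldl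
      (fun idxs i =>
        idxs ++ [(PySem.List.pyRange 0 16 1).map (fun _j => PySem.List.pyGetD bounds i 0)]) []
  (PySem.List.pyRange 0 (PySem.Int.floordiv 16 slice_size) 1).foldl
    (fun ret k =>
      (PySem.List.pyRange 0 (bounds.length : Int) 1).foldl
        (fun ret i =>
          ret ++ PySem.List.slice (PySem.List.pyGetD idxs i [])
                   (some (k * slice_size)) (some ((k + 1) * slice_size))) ret) []

-- ===== PORT B =====
def coeff_bounds_alt (bounds : List Int) (slice_size : Int) : List Int :=
  let nblocks := PySem.Int.floordiv 16 slice_size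
  (PySem.List.pyRange 0 nblocks 1).flatMap (fun _ =>
    bounds.flatMap (fun b => (PySem.List.pyRange 0 slice_size 1).map (fun _ => b)))

-- ===== PRECONDITION & SPEC =====
-- Python A raises ZeroDivisionError at '16//slice_size' exactly when slice_size = 0.
def Pre_coeff_bounds (bounds : List Int) (slice_size : Int) : Prop := slice_size ≠ 0
instance (bounds : List Int) (slice_size : Int) : Decidable (Pre_coeff_bounds bounds slice_size) := by unfold Pre_coeff_bounds; infer_instance
def pvWitness_coeff_bounds : List Int × Int := ([3, 1, 2], 4)

def Spec_coeff_bounds (bounds : List Int) (slice_size : Int) (out : List Int) : Prop := out = coeff_bounds_alt bounds slice_size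
instance (bounds : List Int) (slice_size : Int) (out : List Int) : Decidable (Spec_coeff_bounds bounds slice_size out) := by unfold Spec_coeff_bounds; infer_instance

-- ===== CLAIM (what is proved, stated in full; the proofs are below) =====
def Claim_equal_coeff_bounds : Prop := ∀ (bounds : List Int) (slice_size : Int), Dom_coeff_bounds bounds slice_size → Pre_coeff_bounds bounds slice_size → Spec_coeff_bounds bounds slice_size (coeff_bounds bounds slice_size)

-- ===== LEMMAS AND PROOFS =====

-- B in closed form: the block, replicated (16//s).toNat times.
-- (used by the equivalence proof below)
theorem coeff_bounds_alt_eq (bounds : List Int) (s : Int) :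
    coeff_bounds_alt bounds s =
      (List.replicate (PySem.Int.floordiv 16 s).toNat
        ((bounds.map (fun b => List.replicate s.toNat b)).flatten)).flatten := by
  unfold coeff_bounds_alt
  simp only [List.flatMap_def, List.map_const', PySem.List.length_pyRange_one, Int.sub_zero]

-- A's first loop builds the list of 16-copy rows.
theorem coeff_bounds_idxs_eq (bounds : List Int) :
    ((PySem.List.pyRange 0 (bounds.length : Int) 1).foldl
      (fun idxs i =>
        idxs ++ [(PySem.List.pyRange 0 16 1).map (fun _j => PySem.List.pyGetD bounds i 0)])
      ([] : List (List Int)))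
    = bounds.map (fun b => List.replicate 16 b) := by
  rw [PySem.List.foldl_append_singleton_eq_map]
  have h16 : ((PySem.List.pyRange 0 (16 : Int) 1).length) = 16 := by decide
  simp only [List.nil_append, List.map_const', h16]
  show ((PySem.List.pyRange 0 (bounds.length : Int) 1).map
      ((fun b => List.replicate 16 b) ∘ (fun i => PySem.List.pyGetD bounds i (0 : Int)))) = _
  rw [← List.map_map, PySem.List.map_pyGetD_pyRange_zero']

-- slicing the k-th block out of a 16-wide constant row gives s.toNat copies
theorem slice_replicate_block (b k s : Int) (hk : 0 ≤ k) (hs : 0 < s)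
    (hub : (k + 1) * s ≤ 16) :
    PySem.List.slice (List.replicate 16 b) (some (k * s)) (some ((k + 1) * s))
      = List.replicate s.toNat b := by
  have h1 : 0 ≤ k * s := mul_nonneg hk (le_of_lt hs)
  have h2 : 0 ≤ (k + 1) * s := mul_nonneg (by omega) (le_of_lt hs)
  have e1 : (k + 1) * s = k * s + s := by ring
  rw [PySem.List.slice_toNat _ h1 h2, List.drop_replicate, List.take_replicate]
  congr 1
  rw [e1] at hub ⊢
  omega

theorem coeff_bounds_main (bounds : List Int) (s : Int) (hs : s ≠ 0) :
    coeff_bounds bounds s = coeff_bounds_alt bounds s := by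
  rw [coeff_bounds_alt_eq]
  unfold coeff_bounds
  simp only [coeff_bounds_idxs_eq]
  rcases lt_or_gt_of_ne hs with hneg | hpos
  · -- s < 0 : 16//s < 0, both sides are []
    have hmod := PySem.Int.mod_neg_bounds (a := 16) hneg
    have hdm := PySem.Int.floordiv_mul_add_mod 16 s
    have hn : PySem.Int.floordiv 16 s < 0 := by nlinarith
    rw [PySem.List.pyRange_one 0 (PySem.Int.floordiv 16 s),
      show ((PySem.Int.floordiv 16 s) - 0).toNat = 0 from by omega]
    simp [Int.toNat_of_nonpos (le_of_lt hn)]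
  · -- 0 < s
    have hbody : ∀ (ret : List Int) (k : Int), k ∈ PySem.List.pyRange 0 (PySem.Int.floordiv 16 s) 1 →
        ((PySem.List.pyRange 0 (bounds.length : Int) 1).foldl
          (fun ret i =>
            ret ++ PySem.List.slice (PySem.List.pyGetD (bounds.map (fun b => List.replicate 16 b)) i [])
                     (some (k * s)) (some ((k + 1) * s))) ret)
        = ret ++ ((bounds.map (fun b => List.replicate s.toNat b)).flatten) := by
      intro ret k hkmem
      rw [PySem.List.mem_pyRange_one] at hkmem
      obtain ⟨hk0, hkn⟩ := hkmem
      have hub : (k + 1) * s ≤ 16 := by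
        rw [← PySem.Int.le_floordiv_iff_mul_le hpos]
        omega
      rw [PySem.List.foldl_append_eq_flatMap, List.flatMap_def]
      congr 1
      congr 1
      have hlen : (bounds.length : Int) = ((bounds.map (fun b => List.replicate 16 b)).length : Int) := by
        simp
      rw [hlen]
      show ((PySem.List.pyRange 0 ((bounds.map (fun b => List.replicate 16 b)).length : Int) 1).map
          ((fun row => PySem.List.slice row (some (k * s)) (some ((k + 1) * s))) ∘
            (fun i => PySem.List.pyGetD (bounds.map (fun b => List.replicate 16 b)) i ([] : List Int)))) = _
      rw [← List.map_map, PySem.List.map_pyGetD_pyRange_zero', List.map_map]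
      apply List.map_congr_left
      intro b _
      exact slice_replicate_block b k s hk0 hpos hub
    rw [PySem.List.foldl_congr_mem _ _ _ _ hbody]
    rw [PySem.List.foldl_append_eq_flatMap, List.flatMap_def, List.map_const',
      PySem.List.length_pyRange_one, List.nil_append]
    congr 2
    omega

-- ===== VERDICT (by name: the statement is the Claim_ definition above) =====
theorem coeff_bounds_spec : Claim_equal_coeff_bounds := by
  intro bounds slice_size _ hpre
  unfold Spec_coeff_bounds
  exact coeff_bounds_main bounds slice_size hpre
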